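-- pv_equiv track=rewrite | github.com/jancaaa/advent-of-code2020 | day14/day14.py | generate_possible_combinations
-- ===== SOURCE A (Python) =====
-- def generate_possible_combinations(value: str) -> list:
--     value = value.lstrip("0")
--     result = []
--
--     if value.find("X") == -1:
--         result.append(value)
--     else:
--         index = value.index("X")
--         replaced = replaceX(value, index)
--
--         for i in replaced:
--             result.extend(generate_possible_combinations(i))
--     return result
--
-- def replaceX(value: str, index: int) -> list:
--     result = []
--     v = list(value)
--     for i in [0, 1]:
--         v[index] = str(i)
--         result.append("".join(v))
--     return result
-- ===== SOURCE B (Python) =====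
-- def generate_possible_combinations(value: str) -> list:
--     # Flat enumeration: build all bit-strings for the X positions (leftmost X
--     # most significant, 0 before 1), fill them in in one pass, strip once.
--     combos = [""]
--     for _ in range(value.count("X")):
--         combos = [c + b for c in combos for b in "01"]
--     result = []
--     for bits in combos:
--         it = iter(bits)
--         filled = "".join(next(it) if ch == "X" else ch for ch in value)
--         result.append(filled.lstrip("0"))
--     return result
-- ===== Notes on version B (the rewrite author's own statement) =====
-- stated objective: simpler
-- what changed: Replaces A's recursion (re-strip and replace the first X at every level) with a flat enumeration: build all 2^k bit-strings for the k X positions once, fill each into the string in a single pass, and lstrip once at the end.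
import Mathlib
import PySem

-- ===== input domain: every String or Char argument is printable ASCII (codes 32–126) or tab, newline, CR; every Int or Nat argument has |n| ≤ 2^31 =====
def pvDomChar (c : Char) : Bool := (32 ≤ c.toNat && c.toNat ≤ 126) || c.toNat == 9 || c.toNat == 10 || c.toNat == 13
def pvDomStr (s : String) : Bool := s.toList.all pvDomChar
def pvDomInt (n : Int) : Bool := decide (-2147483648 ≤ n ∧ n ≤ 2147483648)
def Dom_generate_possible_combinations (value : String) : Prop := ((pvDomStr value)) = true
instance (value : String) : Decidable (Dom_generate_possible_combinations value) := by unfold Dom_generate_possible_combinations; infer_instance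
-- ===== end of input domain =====

-- B replaces A's per-X recursion (with a re-strip at every level) by one flat
-- enumeration of all bit assignments plus a single final lstrip; objective: simpler.

-- ===== PORT A =====
-- replaceX(value, index): v = list(value); v[index] = str(i) for i in [0, 1]
def replaceX (value : List Char) (index : Nat) : List (List Char) :=
  [value.set index '0', value.set index '1']

-- count X strictly drops at each recursive call (used by gpcA's decreasing_by)
theorem count_set_lt (v : List Char) (i : Nat) (b : Char)
    (hi : i < v.length) (hx : v[i] = 'X') (hb : b ≠ 'X') :
    (v.set i b).count 'X' < v.count 'X' := by
  rw [List.count_set hi]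
  have hone : 1 ≤ v.count 'X' := by
    have : 'X' ∈ v := hx ▸ List.getElem_mem hi
    exact List.one_le_count_iff.mpr this
  simp [hx, hb]
  exact hx ▸ List.getElem_mem hi

theorem count_dropWhile0 (v : List Char) :
    (v.dropWhile (· == '0')).count 'X' = v.count 'X' := by
  induction v with
  | nil => rfl
  | cons c cs ih =>
    rw [List.dropWhile_cons]
    by_cases h : c = '0'
    · subst h
      simp [ih]
    · simp [h]

-- the work happens on List Char (list(value) / "".join are the str↔list moves)
def gpcA (value : List Char) : List (List Char) :=
  -- value = value.lstrip("0")  (drop leading '0' characters; exact)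
  let v := value.dropWhile (· == '0')
  -- value.find("X") == -1 test and value.index("X") both = first index of 'X'
  match h : v.findIdx? (· == 'X') with
  | none => [v]
  | some index =>
    -- for i in replaced: result.extend(generate_possible_combinations(i))
    (replaceX v index).attach.flatMap (fun i => gpcA i.1)
termination_by value.count 'X'
decreasing_by
  obtain ⟨hlt, hx, -⟩ := List.findIdx?_eq_some_iff_getElem.mp h
  rw [← count_dropWhile0 value]
  have hmem := i.2
  simp only [replaceX, List.mem_cons, List.not_mem_nil, or_false] at hmem
  rcases hmem with h0 | h0 <;>
    (rw [h0]; exact count_set_lt _ _ _ hlt (by simpa using hx) (by decide))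

def generate_possible_combinations (value : String) : List String :=
  (gpcA value.toList).map String.mk

-- ===== PORT B =====
-- combos = [c + b for c in combos for b in "01"]
def combosStep (cs : List (List Char)) : List (List Char) :=
  cs.flatMap (fun c => ['0', '1'].map (fun b => c ++ [b]))

-- combos = [""] ; for _ in range(n): combos = combosStep(combos)
def combos (n : Nat) : List (List Char) :=
  (List.range n).foldl (fun cs _ => combosStep cs) [[]]

-- "".join(next(it) if ch == "X" else ch for ch in value): consume bits left to right
def fillB : List Char → List Char → List Char
  | [], _ => []
  | c :: cs, bs =>
    if c = 'X' then
      match bs with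
      | b :: bs' => b :: fillB cs bs'
      | [] => c :: fillB cs []   -- unreachable: bits always has exactly count-'X' elements
    else c :: fillB cs bs

def generate_possible_combinations_alt (value : String) : List String :=
  (combos (value.toList.count 'X')).map   -- value.count("X") = number of 'X' chars
    (fun bits => String.mk ((fillB value.toList bits).dropWhile (· == '0')))  -- .lstrip("0")

-- ===== PRECONDITION & SPEC =====
def Spec_generate_possible_combinations (value : String) (out : List String) : Prop := out = generate_possible_combinations_alt value
instance (value : String) (out : List String) : Decidable (Spec_generate_possible_combinations value out) := by unfold Spec_generate_possible_combinations; infer_instance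

-- ===== CLAIM (what is proved, stated in full; the proofs are below) =====
def Claim_equal_generate_possible_combinations : Prop := ∀ (value : String), Dom_generate_possible_combinations value → Spec_generate_possible_combinations value (generate_possible_combinations value)

-- ===== LEMMAS AND PROOFS =====

theorem combos_succ (n : Nat) : combos (n + 1) = combosStep (combos n) := by
  simp [combos, List.range_succ]

theorem combosStep_map_cons (b : Char) (cs : List (List Char)) :
    combosStep (cs.map (b :: ·)) = (combosStep cs).map (b :: ·) := by
  simp [combosStep, List.flatMap_map, List.map_flatMap]

-- front decomposition: the leftmost bit is most significant, 0 before 1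
theorem combos_succ_front (n : Nat) :
    combos (n + 1) = (combos n).map ('0' :: ·) ++ (combos n).map ('1' :: ·) := by
  induction n with
  | zero => decide
  | succ n ih =>
    calc combos (n + 2) = combosStep (combos (n + 1)) := combos_succ _
      _ = combosStep ((combos n).map ('0' :: ·) ++ (combos n).map ('1' :: ·)) := by rw [ih]
      _ = combosStep ((combos n).map ('0' :: ·)) ++ combosStep ((combos n).map ('1' :: ·)) := by
          simp only [combosStep, List.flatMap_append]
      _ = (combosStep (combos n)).map ('0' :: ·) ++ (combosStep (combos n)).map ('1' :: ·) := by
          rw [combosStep_map_cons, combosStep_map_cons]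
      _ = (combos (n + 1)).map ('0' :: ·) ++ (combos (n + 1)).map ('1' :: ·) := by
          rw [combos_succ]

theorem fillB_no_X (v : List Char) (bs : List Char) (h : 'X' ∉ v) : fillB v bs = v := by
  induction v generalizing bs with
  | nil => rfl
  | cons c cs ih =>
    have hc : c ≠ 'X' := fun hc => h (hc ▸ List.mem_cons_self)
    simp only [fillB, if_neg hc]
    rw [ih bs (fun hm => h (List.mem_cons_of_mem _ hm))]

theorem fillB_prefix (t r : List Char) (bs : List Char) (h : 'X' ∉ t) :
    fillB (t ++ r) bs = t ++ fillB r bs := by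
  induction t generalizing bs with
  | nil => rfl
  | cons c cs ih =>
    have hc : c ≠ 'X' := fun hc => h (hc ▸ List.mem_cons_self)
    simp only [List.cons_append, fillB, if_neg hc]
    rw [ih bs (fun hm => h (List.mem_cons_of_mem _ hm))]

theorem dropWhile0_append_zeros (p w : List Char) (h : ∀ c ∈ p, c = '0') :
    (p ++ w).dropWhile (· == '0') = w.dropWhile (· == '0') := by
  induction p with
  | nil => rfl
  | cons c cs ih =>
    have hc : c = '0' := h c List.mem_cons_self
    simp only [List.cons_append, List.dropWhile, hc]
    exact ih (fun x hx => h x (List.mem_cons_of_mem _ hx))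

-- the key bridge: strip once after a full fill = strip now, fix the first X, go on
theorem strip_fill_step (v : List Char) (index : Nat) (b : Char) (bs : List Char)
    (hb : b ≠ 'X')
    (hfind : (v.dropWhile (· == '0')).findIdx? (· == 'X') = some index) :
    (fillB v (b :: bs)).dropWhile (· == '0')
      = (fillB ((v.dropWhile (· == '0')).set index b) bs).dropWhile (· == '0') := by
  set v' := v.dropWhile (· == '0') with hv'
  obtain ⟨hlt, hx, hfirst⟩ := List.findIdx?_eq_some_iff_getElem.mp hfind
  have hx' : v'[index] = 'X' := by simpa using hx
  have hsplit : v = v.takeWhile (· == '0') ++ v' := (List.takeWhile_append_dropWhile).symm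
  have hp0 : ∀ c ∈ v.takeWhile (· == '0'), c = '0' := fun c hc => by
    simpa using List.mem_takeWhile_imp hc
  have hpX : 'X' ∉ v.takeWhile (· == '0') := fun hm => by
    have := hp0 _ hm; simp at this
  have hv'split : v' = v'.take index ++ 'X' :: v'.drop (index + 1) := by
    conv_lhs => rw [← List.take_append_drop index v']
    rw [List.drop_eq_getElem_cons hlt, hx']
  have htX : 'X' ∉ v'.take index := by
    intro hm
    rw [List.mem_take_iff_getElem] at hm
    obtain ⟨j, hj, hje⟩ := hm
    exact hfirst j (by omega) (by simp [hje])
  have hset : v'.set index b = v'.take index ++ b :: v'.drop (index + 1) := by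
    rw [List.set_eq_take_append_cons_drop, if_pos hlt]
  have lhs1 : fillB v (b :: bs)
      = v.takeWhile (· == '0') ++ (v'.take index ++ b :: fillB (v'.drop (index + 1)) bs) := by
    conv_lhs => rw [hsplit, hv'split]
    rw [fillB_prefix _ _ _ hpX, fillB_prefix _ _ _ htX]
    simp [fillB]
  have rhs1 : fillB (v'.set index b) bs
      = v'.take index ++ b :: fillB (v'.drop (index + 1)) bs := by
    rw [hset, fillB_prefix _ _ _ htX]
    simp [fillB, hb]
  rw [lhs1, rhs1, dropWhile0_append_zeros _ _ hp0]

theorem flatMap_attach_val {α β : Type} (l : List α) (f : α → List β) :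
    l.attach.flatMap (fun i => f i.1) = l.flatMap f := by
  conv_rhs => rw [← List.attach_map_subtype_val l]
  rw [List.flatMap_map]

-- unfolding gpcA when no 'X' remains
theorem gpcA_none (value : List Char)
    (h : (value.dropWhile (· == '0')).findIdx? (· == 'X') = none) :
    gpcA value = [value.dropWhile (· == '0')] := by
  rw [gpcA]
  split
  · rfl
  · simp_all

-- unfolding gpcA at the first 'X'
theorem gpcA_some (value : List Char) (index : Nat)
    (h : (value.dropWhile (· == '0')).findIdx? (· == 'X') = some index) :
    gpcA value = gpcA ((value.dropWhile (· == '0')).set index '0')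
               ++ gpcA ((value.dropWhile (· == '0')).set index '1') := by
  rw [gpcA]
  split
  · simp_all
  · rename_i idx heq
    rw [heq] at h
    injection h with h
    subst h
    rw [flatMap_attach_val]
    simp [replaceX]

-- main invariant: A's recursion = B's flat enumeration
theorem gpcA_eq_combos (n : Nat) :
    ∀ v : List Char, v.count 'X' = n →
      gpcA v = (combos n).map (fun bs => (fillB v bs).dropWhile (· == '0')) := by
  induction n with
  | zero =>
    intro v hv
    have hnoX : 'X' ∉ v := List.count_eq_zero.mp hv
    have hnoX' : 'X' ∉ v.dropWhile (· == '0') :=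
      fun hm => hnoX ((List.dropWhile_sublist _).subset hm)
    have hfind : (v.dropWhile (· == '0')).findIdx? (· == 'X') = none :=
      List.findIdx?_eq_none_iff.mpr (fun x hxm => by
        have : x ≠ 'X' := fun e => hnoX' (e ▸ hxm)
        simp [this])
    rw [gpcA_none v hfind]
    simp [combos, fillB_no_X v [] hnoX]
  | succ n ih =>
    intro v hv
    have hcount' : (v.dropWhile (· == '0')).count 'X' = n + 1 := by
      rw [count_dropWhile0, hv]
    have hmem : 'X' ∈ v.dropWhile (· == '0') := List.count_pos_iff.mp (by omega)
    obtain ⟨index, hfind⟩ : ∃ i, (v.dropWhile (· == '0')).findIdx? (· == 'X') = some i := by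
      cases hidx : (v.dropWhile (· == '0')).findIdx? (· == 'X') with
      | some i => exact ⟨i, rfl⟩
      | none =>
        have := List.findIdx?_eq_none_iff.mp hidx 'X' hmem
        simp at this
    obtain ⟨hlt, hx, -⟩ := List.findIdx?_eq_some_iff_getElem.mp hfind
    have hx' : (v.dropWhile (· == '0'))[index] = 'X' := by simpa using hx
    have hc0 : ((v.dropWhile (· == '0')).set index '0').count 'X' = n := by
      rw [List.count_set hlt]
      simp [hx']
      omega
    have hc1 : ((v.dropWhile (· == '0')).set index '1').count 'X' = n := by
      rw [List.count_set hlt]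
      simp [hx']
      omega
    rw [gpcA_some v index hfind, ih _ hc0, ih _ hc1,
        combos_succ_front, List.map_append, List.map_map, List.map_map]
    congr 1
    · refine List.map_congr_left (fun bs _ => ?_)
      exact (strip_fill_step v index '0' bs (by decide) hfind).symm
    · refine List.map_congr_left (fun bs _ => ?_)
      exact (strip_fill_step v index '1' bs (by decide) hfind).symm

-- ===== VERDICT (by name: the statement is the Claim_ definition above) =====
theorem generate_possible_combinations_spec : Claim_equal_generate_possible_combinations := by
  intro value _
  unfold Spec_generate_possible_combinations generate_possible_combinations generate_possible_combinations_alt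
  rw [gpcA_eq_combos (value.toList.count 'X') value.toList rfl, List.map_map]
  rfl
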